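-- pv_equiv track=rewrite | github.com/ZzZDdD11/MaM-RAG | tools/evaluate_lenient.py | evidence_tokens
-- ===== SOURCE A (Python) =====
-- from typing import List, Optional, Set, Tuple
--
-- def normalize_token(tok: str, a2s: dict):
--     tok = tok.strip()
--     if not tok: return ""
--     if tok in a2s: return a2s[tok]
--     return tok
--
-- def evidence_tokens(
--     evidences: List[str],
--     a2s: dict,
--     allow: Optional[Set[str]] = None,
--     relation_keywords: Optional[List[str]] = None,
--     window: int = 32,
-- ):
--     """Extract normalized entity tokens from evidence text.
--     Simple approach: find all entities from a2s in the text, normalize them, and return.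
--     """
--     text = "\n".join(evidences)[:8000]
--     cands = set()
--     for a in a2s.keys():
--         if not a or len(a) < 2:
--             continue
--         if a in text:
--             norm = normalize_token(a, a2s)
--             if norm:
--                 cands.add(norm)
--     return cands
-- ===== SOURCE B (Python) =====
-- def evidence_tokens(evidences, a2s, allow=None, relation_keywords=None, window=32):
--     text = "\n".join(evidences)[:8000]
--     # index every substring of text whose length is the length of some key
--     lengths = {len(a) for a in a2s if len(a) >= 2}
--     windows = {text[i:i + L] for L in lengths for i in range(len(text) - L + 1)}
--     out = set()
--     for a in a2s:
--         if len(a) >= 2 and a in windows: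
--             s = a.strip()
--             if s:
--                 v = a2s.get(s, s)
--                 if v:
--                     out.add(v)
--     return out
-- ===== Notes on version B (the rewrite author's own statement) =====
-- stated objective: faster
-- what changed: Instead of running a substring search over the (8000-char-capped) text once per key, B builds a hash set of all text windows whose lengths occur among the keys once, so each key becomes a single O(1) set-membership test.
import Mathlib
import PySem

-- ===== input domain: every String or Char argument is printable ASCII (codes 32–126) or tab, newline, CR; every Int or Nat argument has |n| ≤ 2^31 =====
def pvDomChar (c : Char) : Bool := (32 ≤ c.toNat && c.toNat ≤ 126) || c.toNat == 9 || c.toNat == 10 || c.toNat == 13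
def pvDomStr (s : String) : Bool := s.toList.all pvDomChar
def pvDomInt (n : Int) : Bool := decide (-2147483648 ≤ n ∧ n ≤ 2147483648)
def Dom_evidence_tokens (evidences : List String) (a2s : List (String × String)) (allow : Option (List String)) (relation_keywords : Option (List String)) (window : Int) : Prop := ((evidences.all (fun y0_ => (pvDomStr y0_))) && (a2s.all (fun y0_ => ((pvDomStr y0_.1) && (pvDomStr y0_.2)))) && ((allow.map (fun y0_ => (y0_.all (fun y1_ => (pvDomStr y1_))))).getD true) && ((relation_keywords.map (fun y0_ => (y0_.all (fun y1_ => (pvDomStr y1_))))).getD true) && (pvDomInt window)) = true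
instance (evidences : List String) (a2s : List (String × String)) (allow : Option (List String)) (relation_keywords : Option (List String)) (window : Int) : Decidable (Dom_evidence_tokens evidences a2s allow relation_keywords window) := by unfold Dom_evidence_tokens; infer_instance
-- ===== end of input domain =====

-- B replaces A's per-key substring scan of the text by a substring index (a set of all text
-- windows of the key lengths) built once, so each key is a single set-membership test.

-- ===== PORT A =====
-- helper: Python's normalize_token(tok, a2s)
def normalize_token (tok : String) (a2s : PySem.Dict String String) : String :=
  let tok := PySem.Str.strip tok
  if tok = "" then ""
  else if a2s.contains tok then (a2s.get? tok).getD ""   -- a2s[tok]; contains guard makes the default unreachable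
  else tok

def evidence_tokens (evidences : List String) (a2s : List (String × String)) (allow : Option (List String)) (relation_keywords : Option (List String)) (window : Int) : List String :=
  let d := PySem.Dict.ofList a2s
  let text := PySem.Str.slice (PySem.Str.join "\n" evidences) none (some 8000)
  d.keys.foldl (fun cands a =>
    if a = "" ∨ PySem.Str.len a < 2 then cands
    else if PySem.Str.isIn a text then
      let norm := normalize_token a d
      if norm ≠ "" then PySem.Set.add cands norm else cands
    else cands) PySem.Set.empty

-- ===== PORT B =====
-- helper: the list underlying B's window set {text[i:i+L] for L in lens for i in range(len(text)-L+1)}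
def pvWindows (text : String) (lens : List Int) : List String :=
  lens.flatMap (fun L =>
    (PySem.List.pyRange 0 (PySem.Str.len text - L + 1) 1).map
      (fun i => PySem.Str.slice text (some i) (some (i + L))))

def evidence_tokens_alt (evidences : List String) (a2s : List (String × String)) (allow : Option (List String)) (relation_keywords : Option (List String)) (window : Int) : List String :=
  let text := PySem.Str.slice (PySem.Str.join "\n" evidences) none (some 8000)
  let d := PySem.Dict.ofList a2s
  let lengths : PySem.Set Int :=
    PySem.Set.ofList ((d.keys.filter (fun a => 2 ≤ PySem.Str.len a)).map (fun a => PySem.Str.len a))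
  let windows : PySem.Set String := PySem.Set.ofList (pvWindows text lengths)
  d.keys.foldl (fun out a =>
    if 2 ≤ PySem.Str.len a ∧ PySem.Set.contains windows a then
      let s := PySem.Str.strip a
      if s ≠ "" then
        let v := d.getD s s
        if v ≠ "" then PySem.Set.add out v else out
      else out
    else out) PySem.Set.empty

-- ===== PRECONDITION & SPEC =====
def Spec_evidence_tokens (evidences : List String) (a2s : List (String × String)) (allow : Option (List String)) (relation_keywords : Option (List String)) (window : Int) (out : List String) : Prop := out = evidence_tokens_alt evidences a2s allow relation_keywords window
instance (evidences : List String) (a2s : List (String × String)) (allow : Option (List String)) (relation_keywords : Option (List String)) (window : Int) (out : List String) : Decidable (Spec_evidence_tokens evidences a2s allow relation_keywords window out) := by unfold Spec_evidence_tokens; infer_instance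

-- ===== CLAIM (what is proved, stated in full; the proofs are below) =====
def Claim_equal_evidence_tokens : Prop := ∀ (evidences : List String) (a2s : List (String × String)) (allow : Option (List String)) (relation_keywords : Option (List String)) (window : Int), Dom_evidence_tokens evidences a2s allow relation_keywords window → Spec_evidence_tokens evidences a2s allow relation_keywords window (evidence_tokens evidences a2s allow relation_keywords window)

-- ===== LEMMAS AND PROOFS =====


-- a string of length ≥ 1 whose length is one of the indexed (nonnegative) lengths lies in the
-- window list exactly when it is a substring of the text
lemma mem_pvWindows_iff (text a : String) (lens : List Int)
    (hpos : ∀ L ∈ lens, 0 ≤ L)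
    (hL : (a.toList.length : Int) ∈ lens) (h1 : 1 ≤ a.toList.length) :
    a ∈ pvWindows text lens ↔ PySem.Str.isIn a text = true := by
  constructor
  · intro h
    rw [pvWindows, List.mem_flatMap] at h
    obtain ⟨L, hLm, h⟩ := h
    rw [List.mem_map] at h
    obtain ⟨i, hi, hsl⟩ := h
    rw [PySem.List.mem_pyRange_one] at hi
    have htl : PySem.List.slice text.toList (some i) (some (i + L)) = a.toList := by
      simpa [pysem] using congrArg String.toList hsl
    rw [PySem.List.slice_toNat _ hi.1 (by have := hpos L hLm; omega)] at htl
    have hpref : a.toList <+: text.toList.drop i.toNat := htl ▸ List.take_prefix _ _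
    have := (PySem.Chars.exists_prefix_drop_iff_isIn a.toList text.toList).mp ⟨i.toNat, hpref⟩
    simpa [pysem] using this
  · intro h
    have h' : PySem.Chars.isIn a.toList text.toList = true := by simpa [pysem] using h
    obtain ⟨j, hp⟩ := (PySem.Chars.exists_prefix_drop_iff_isIn a.toList text.toList).mpr h'
    have hlen := hp.length_le
    rw [List.length_drop] at hlen
    have hj : j + a.toList.length ≤ text.toList.length := by omega
    rw [pvWindows, List.mem_flatMap]
    refine ⟨(a.toList.length : Int), hL, ?_⟩
    rw [List.mem_map]
    refine ⟨(j : Int), ?_, ?_⟩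
    · rw [PySem.List.mem_pyRange_one]
      refine ⟨by positivity, ?_⟩
      have hj2 : j + a.length ≤ text.length := by simpa using hj
      simp [pysem]
      omega
    · apply String.toList_inj.mp
      have hgoal : a.toList = List.take a.toList.length (List.drop j text.toList) :=
        List.prefix_iff_eq_take.mp hp
      simp [pysem]
      simpa using hgoal.symm

lemma step_eq (a2s : List (String × String)) (text : String) (a : String)
    (ha : a ∈ (PySem.Dict.ofList a2s).keys) (acc : List String) :
    (if a = "" ∨ PySem.Str.len a < 2 then acc
     else if PySem.Str.isIn a text then
       let norm := normalize_token a (PySem.Dict.ofList a2s)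
       if norm ≠ "" then PySem.Set.add acc norm else acc
     else acc)
    =
    (if 2 ≤ PySem.Str.len a ∧ PySem.Set.contains
          (PySem.Set.ofList (pvWindows text
            (PySem.Set.ofList (((PySem.Dict.ofList a2s).keys.filter (fun a => 2 ≤ PySem.Str.len a)).map (fun a => PySem.Str.len a))))) a then
       let s := PySem.Str.strip a
       if s ≠ "" then
         let v := (PySem.Dict.ofList a2s).getD s s
         if v ≠ "" then PySem.Set.add acc v else acc
       else acc
     else acc) := by
  by_cases hlt : PySem.Str.len a < 2
  · rw [if_pos (Or.inr hlt), if_neg (fun hc => absurd hc.1 (by omega))]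
  · have h2 : 2 ≤ PySem.Str.len a := by omega
    have hne : ¬(a = "" ∨ PySem.Str.len a < 2) := by
      rintro (rfl | h)
      · simp [pysem] at hlt
      · exact hlt h
    rw [if_neg hne]
    have h1 : 1 ≤ a.toList.length := by
      have := PySem.Str.len_eq a; omega
    have hLmem : (a.toList.length : Int) ∈
        (PySem.Set.ofList (((PySem.Dict.ofList a2s).keys.filter (fun a => 2 ≤ PySem.Str.len a)).map (fun a => PySem.Str.len a)) : List Int) := by
      rw [PySem.Set.mem_ofList, List.mem_map]
      exact ⟨a, List.mem_filter.mpr ⟨ha, by simpa using h2⟩, (PySem.Str.len_eq a).symm ▸ rfl⟩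
    have hpos : ∀ L ∈ (PySem.Set.ofList (((PySem.Dict.ofList a2s).keys.filter (fun a => 2 ≤ PySem.Str.len a)).map (fun a => PySem.Str.len a)) : List Int), 0 ≤ L := by
      intro L hLm
      rw [PySem.Set.mem_ofList, List.mem_map] at hLm
      obtain ⟨x, hx, rfl⟩ := hLm
      have hx2 := (List.mem_filter.mp hx).2
      rw [PySem.Str.len_eq]; positivity
    have hwin : PySem.Set.contains
        (PySem.Set.ofList (pvWindows text
          (PySem.Set.ofList (((PySem.Dict.ofList a2s).keys.filter (fun a => 2 ≤ PySem.Str.len a)).map (fun a => PySem.Str.len a))))) a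
        = PySem.Str.isIn a text := by
      rcases hiso : PySem.Str.isIn a text with _ | _
      · rw [← Bool.not_eq_true]
        rw [PySem.Set.contains_iff, PySem.Set.mem_ofList,
          mem_pvWindows_iff text a _ hpos hLmem h1, hiso]
        simp
      · rw [PySem.Set.contains_iff, PySem.Set.mem_ofList,
          mem_pvWindows_iff text a _ hpos hLmem h1]
        exact hiso
    rw [hwin]
    by_cases hiso : PySem.Str.isIn a text = true
    · simp only [hiso, h2, true_and, if_pos trivial]
      simp only [normalize_token]
      by_cases hs : PySem.Str.strip a = ""
      · simp [hs]
      · rcases hget : (PySem.Dict.ofList a2s).get? (PySem.Str.strip a) with _ | v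
        · have hc : (PySem.Dict.ofList a2s).contains (PySem.Str.strip a) = false :=
            (PySem.Dict.get?_eq_none_iff_contains _ _).mp hget
          have hv : (PySem.Dict.ofList a2s).getD (PySem.Str.strip a) (PySem.Str.strip a) = PySem.Str.strip a :=
            PySem.Dict.getD_of_get?_eq_none _ _ hget
          simp [hs, hc, hv]
        · have hc : (PySem.Dict.ofList a2s).contains (PySem.Str.strip a) = true := by
            rw [PySem.Dict.contains_eq_isSome_get?, hget]; rfl
          have hv : (PySem.Dict.ofList a2s).getD (PySem.Str.strip a) (PySem.Str.strip a) = v :=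
            PySem.Dict.getD_of_get?_eq_some _ _ hget
          simp [hs, hc, hv]
    · have hiso' : PySem.Chars.isIn a.toList text.toList = false := by
        rw [← Bool.not_eq_true]; simpa [pysem] using hiso
      simp [hiso']

-- ===== VERDICT (by name: the statement is the Claim_ definition above) =====
theorem evidence_tokens_spec : Claim_equal_evidence_tokens := by
  intro evidences a2s allow relation_keywords window _dom
  unfold Spec_evidence_tokens evidence_tokens evidence_tokens_alt
  exact PySem.List.foldl_congr_mem _ _ _ _
    (fun acc a ha => step_eq a2s _ a ha acc)
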